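-- pv_equiv track=rewrite | github.com/MelihSahinEdu/McChannelCoding | functions.py | count_zeros_with_hat
-- ===== SOURCE A (Python) =====
-- def count_zeros_with_hat(arr,order):
--     sayı = 0
--     for b in range(len(arr)):
--         for a in range(len(arr[b])):
--             if arr[b][a]==0:
--                 if a>=order:
--                     doğruluk=True
--                     for j in range(order):
--                         if arr[b][a-j-1]==1:
--                             doğruluk=False
--                     if doğruluk:
--                         sayı+=1
--     return sayı
-- ===== SOURCE B (Python) =====
-- def count_zeros_with_hat(arr, order):
--     total = 0
--     for row in arr:
--         gap = 0  # length of the run of consecutive non-1 entries just before the current one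
--         for x in row:
--             if x == 0 and gap >= order:
--                 total += 1
--             gap = 0 if x == 1 else gap + 1
--     return total
-- ===== Notes on version B (the rewrite author's own statement) =====
-- stated objective: alternative
-- what changed: replaces the inner backward scan of the previous `order` entries (re-done at every zero) by a single left-to-right pass per row that maintains the running length of the current run of non-1 entries and counts a zero when that run length is at least `order`
import Mathlib
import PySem

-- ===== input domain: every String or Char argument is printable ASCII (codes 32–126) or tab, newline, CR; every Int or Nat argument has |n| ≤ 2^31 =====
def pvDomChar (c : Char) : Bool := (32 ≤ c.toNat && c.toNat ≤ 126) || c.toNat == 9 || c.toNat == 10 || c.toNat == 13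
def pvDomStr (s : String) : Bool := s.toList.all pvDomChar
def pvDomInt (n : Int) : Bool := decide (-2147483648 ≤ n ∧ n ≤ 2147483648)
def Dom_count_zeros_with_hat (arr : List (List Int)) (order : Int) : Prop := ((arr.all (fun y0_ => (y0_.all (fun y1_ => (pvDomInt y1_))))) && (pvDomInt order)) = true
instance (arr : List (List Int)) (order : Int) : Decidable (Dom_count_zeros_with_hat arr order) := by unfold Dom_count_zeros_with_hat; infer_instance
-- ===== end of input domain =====

-- B replaces A's backward scan of the previous `order` entries at every zero by a running run-length counter (one pass per row).

-- ===== PORT A =====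
-- inner `for j in range(order)` loop computing doğruluk
def aInner (order : Int) (row : List Int) (a : Int) : Bool :=
  (PySem.List.pyRange 0 order 1).foldl
    (fun doğruluk j => if PySem.List.pyGetD row (a - j - 1) 0 = 1 then false else doğruluk) true

-- body of the `for a in range(len(arr[b]))` loop
def aStep (order : Int) (row : List Int) (sayı : Int) (a : Int) : Int :=
  if PySem.List.pyGetD row a 0 = 0 then
    if a ≥ order then
      if aInner order row a then sayı + 1 else sayı
    else sayı
  else sayı

-- the `for a in range(len(arr[b]))` loop
def aRow (order : Int) (sayı : Int) (row : List Int) : Int :=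
  (PySem.List.pyRange 0 (row.length : Int) 1).foldl (aStep order row) sayı

def count_zeros_with_hat (arr : List (List Int)) (order : Int) : Int :=
  (PySem.List.pyRange 0 (arr.length : Int) 1).foldl
    (fun sayı b => aRow order sayı (PySem.List.pyGetD arr b [])) 0

-- ===== PORT B =====
-- state = (gap, total): gap is the length of the run of consecutive non-1 entries just before the current one
def bStep (order : Int) (s : Int × Int) (x : Int) : Int × Int :=
  (if x = 1 then 0 else s.1 + 1,
   if x = 0 ∧ s.1 ≥ order then s.2 + 1 else s.2)

def count_zeros_with_hat_alt (arr : List (List Int)) (order : Int) : Int :=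
  arr.foldl (fun total row => (row.foldl (bStep order) ((0 : Int), total)).2) 0

-- ===== PRECONDITION & SPEC =====
def Spec_count_zeros_with_hat (arr : List (List Int)) (order : Int) (out : Int) : Prop := out = count_zeros_with_hat_alt arr order
instance (arr : List (List Int)) (order : Int) (out : Int) : Decidable (Spec_count_zeros_with_hat arr order out) := by unfold Spec_count_zeros_with_hat; infer_instance

-- ===== CLAIM (what is proved, stated in full; the proofs are below) =====
def Claim_equal_count_zeros_with_hat : Prop := ∀ (arr : List (List Int)) (order : Int), Dom_count_zeros_with_hat arr order → Spec_count_zeros_with_hat arr order (count_zeros_with_hat arr order)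

-- ===== LEMMAS AND PROOFS =====

-- gap after a prefix p : length of the maximal suffix of p containing no 1
def gapI (p : List Int) : Int := p.foldl (fun g x => if x = 1 then 0 else g + 1) 0

theorem gapI_append_singleton (p : List Int) (x : Int) :
    gapI (p ++ [x]) = if x = 1 then 0 else gapI p + 1 := by
  simp [gapI, List.foldl_append]

theorem gapI_bounds (p : List Int) : 0 ≤ gapI p ∧ gapI p ≤ (p.length : Int) := by
  induction p using List.reverseRecOn with
  | nil => simp [gapI]
  | append_singleton q x ih =>
      rw [gapI_append_singleton]
      simp only [List.length_append, List.length_cons, List.length_nil]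
      obtain ⟨h1, h2⟩ := ih
      split <;> constructor <;> push_cast <;> omega

-- A's inner loop is an "all" over the range
theorem foldl_and_false {P : Int → Prop} [DecidablePred P] :
    ∀ (l : List Int) (b : Bool),
      l.foldl (fun d j => if P j then false else d) b = (b && l.all (fun j => !decide (P j))) := by
  intro l
  induction l with
  | nil => intro b; simp
  | cons y t ih =>
      intro b
      simp only [List.foldl_cons, List.all_cons]
      by_cases hy : P y
      · rw [if_pos hy, ih]; simp [hy]
      · rw [if_neg hy, ih]; simp [hy]

theorem aInner_eq_all (order : Int) (row : List Int) (a : Int) :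
    aInner order row a = true ↔
      ∀ j : Int, 0 ≤ j → j < order → PySem.List.pyGetD row (a - j - 1) 0 ≠ 1 := by
  unfold aInner
  rw [foldl_and_false]
  simp only [Bool.true_and, List.all_eq_true, Bool.not_eq_eq_eq_not, Bool.not_true,
    decide_eq_false_iff_not, PySem.List.mem_pyRange_one]
  constructor
  · intro hall j h0 hj; exact hall j ⟨h0, hj⟩
  · intro hall j hj; exact hall j hj.1 hj.2

-- the crux: A's backward-window test at position p.length equals "run length ≥ order"
theorem gap_char (order : Int) (p : List Int) :
    (order ≤ (p.length : Int) ∧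
      ∀ j : Int, 0 ≤ j → j < order → PySem.List.pyGetD p ((p.length : Int) - j - 1) 0 ≠ 1)
    ↔ order ≤ gapI p := by
  induction p using List.reverseRecOn generalizing order with
  | nil =>
      simp only [List.length_nil, Int.ofNat_zero, gapI, List.foldl_nil]
      constructor
      · intro h; exact h.1
      · intro h; exact ⟨h, by omega⟩
  | append_singleton q x ih =>
      rw [gapI_append_singleton]
      by_cases hord : order ≤ 0
      · constructor
        · intro _; split <;> [omega; (have := (gapI_bounds q).1; omega)]
        · intro _
          refine ⟨by omega, fun j h0 hj _ => by omega⟩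
      · rw [not_le] at hord
        have hlen : ((q ++ [x]).length : Int) = (q.length : Int) + 1 := by simp
        by_cases hx : x = 1
        · -- j = 0 witnesses failure on the left; gap = 0 < order on the right
          subst hx
          rw [if_pos rfl]
          constructor
          · rintro ⟨-, hall⟩
            exfalso
            have h0 := hall 0 (by omega) hord
            apply h0
            have : ((q ++ [(1:Int)]).length : Int) - 0 - 1 = (q.length : Int) := by omega
            rw [this]
            rw [PySem.List.pyGetD_natCast]
            simp [List.getD]
          · intro h; omega
        · simp only [if_neg hx]
          by_cases hq : order ≤ (q.length : Int) + 1
          · -- indices stay in range; shift j ↦ j+1 and use ih at order-1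
            have hsh : (order ≤ gapI q + 1) ↔ (order - 1 ≤ gapI q) := by omega
            rw [hsh, ← ih (order - 1)]
            constructor
            · rintro ⟨-, hall⟩
              refine ⟨by omega, fun j h0 hj => ?_⟩
              have h' := hall (j + 1) (by omega) (by omega)
              have hidx : ((q ++ [x]).length : Int) - (j + 1) - 1 = (q.length : Int) - j - 1 := by
                omega
              rw [hidx] at h'
              intro hc; apply h'
              have hr : 0 ≤ (q.length : Int) - j - 1 ∧ (q.length : Int) - j - 1 < (q.length : Int) := by omega
              rw [PySem.List.pyGetD_eq_getElem _ _ hr.1 (by exact_mod_cast hr.2)] at hc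
              rw [PySem.List.pyGetD_eq_getElem _ _ hr.1 (by simp; omega)]
              rw [List.getElem_append_left (by omega)]
              exact hc
            · rintro ⟨hlq, hall⟩
              refine ⟨by omega, fun j h0 hj => ?_⟩
              by_cases hj0 : j = 0
              · subst hj0
                have hidx : ((q ++ [x]).length : Int) - 0 - 1 = (q.length : Int) := by omega
                rw [hidx, PySem.List.pyGetD_natCast]
                simp [hx]
              · have h' := hall (j - 1) (by omega) (by omega)
                have hidx : ((q ++ [x]).length : Int) - j - 1 = (q.length : Int) - (j - 1) - 1 := by
                  omega
                rw [hidx]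
                intro hc; apply h'
                have hr : 0 ≤ (q.length : Int) - (j - 1) - 1 ∧ (q.length : Int) - (j - 1) - 1 < (q.length : Int) := by omega
                rw [PySem.List.pyGetD_eq_getElem _ _ hr.1 (by simp; omega)] at hc
                rw [PySem.List.pyGetD_eq_getElem _ _ hr.1 (by exact_mod_cast hr.2)]
                rw [List.getElem_append_left (by omega)] at hc
                exact hc
          · -- order too large for the prefix: both sides false
            have hb := gapI_bounds q
            constructor
            · rintro ⟨h1, -⟩; rw [hlen] at h1; omega
            · intro h; omega

-- one A-step at position pre.length of the full row equals one B-step from gap = gapI pre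
theorem step_eq (order : Int) (pre rest : List Int) (x : Int) (c : Int) :
    aStep order (pre ++ x :: rest) c (pre.length : Int) =
      (bStep order (gapI pre, c) x).2 ∧
    gapI (pre ++ [x]) = (bStep order (gapI pre, c) x).1 := by
  constructor
  · unfold aStep bStep
    dsimp only
    have hget : PySem.List.pyGetD (pre ++ x :: rest) (pre.length : Int) 0 = x := by
      rw [PySem.List.pyGetD_natCast]
      simp [List.getD]
    rw [hget]
    by_cases hx : x = 0
    · subst hx
      rw [if_pos rfl]
      by_cases ha : (pre.length : Int) ≥ order
      · rw [if_pos ha]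
        have hcond : aInner order (pre ++ (0:Int) :: rest) (pre.length : Int) = true ↔ order ≤ gapI pre := by
          rw [aInner_eq_all, ← gap_char order pre]
          constructor
          · rintro hall
            refine ⟨by omega, fun j h0 hj => ?_⟩
            have h' := hall j h0 hj
            intro hc; apply h'
            have hr : 0 ≤ (pre.length : Int) - j - 1 ∧ (pre.length : Int) - j - 1 < (pre.length : Int) := by omega
            rw [PySem.List.pyGetD_eq_getElem _ _ hr.1 (by exact_mod_cast hr.2)] at hc
            rw [PySem.List.pyGetD_eq_getElem _ _ hr.1 (by simp; omega)]
            rw [List.getElem_append_left (by omega)]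
            exact hc
          · rintro ⟨-, hall⟩ j h0 hj
            have h' := hall j h0 hj
            intro hc; apply h'
            have hr : 0 ≤ (pre.length : Int) - j - 1 ∧ (pre.length : Int) - j - 1 < (pre.length : Int) := by omega
            rw [PySem.List.pyGetD_eq_getElem _ _ hr.1 (by simp; omega)] at hc
            rw [PySem.List.pyGetD_eq_getElem _ _ hr.1 (by exact_mod_cast hr.2)]
            rw [List.getElem_append_left (by omega)] at hc
            exact hc
        by_cases hd : order ≤ gapI pre
        · rw [if_pos (hcond.mpr hd), if_pos ⟨rfl, hd⟩]
        · rw [if_neg (fun h => hd (hcond.mp h)), if_neg (by rintro ⟨-, h⟩; exact hd h)]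
      · rw [if_neg ha, if_neg ?_]
        rintro ⟨-, h⟩
        exact ha (le_trans h (gapI_bounds pre).2)
    · rw [if_neg hx, if_neg (by rintro ⟨h, -⟩; exact hx h)]
  · rw [gapI_append_singleton]; rfl

-- A's row loop over indices [pre.length, pre.length+rest.length) equals B's fold over rest
theorem row_gen (order : Int) (rest : List Int) :
    ∀ (pre : List Int) (c : Int),
      (PySem.List.pyRange (pre.length : Int) (((pre ++ rest).length : Int)) 1).foldl
        (aStep order (pre ++ rest)) c
      = (rest.foldl (bStep order) (gapI pre, c)).2 := by
  induction rest with
  | nil =>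
      intro pre c
      rw [PySem.List.pyRange_one_eq_nil (by simp)]
      rfl
  | cons x t ih =>
      intro pre c
      have hlt : (pre.length : Int) < ((pre ++ x :: t).length : Int) := by
        simp
      rw [PySem.List.pyRange_one_cons hlt, List.foldl_cons]
      have hs := step_eq order pre t x c
      have hassoc : pre ++ x :: t = (pre ++ [x]) ++ t := by simp
      have hlen1 : (pre.length : Int) + 1 = ((pre ++ [x]).length : Int) := by simp
      rw [hs.1]
      calc (PySem.List.pyRange ((pre.length : Int) + 1) (((pre ++ x :: t).length : Int)) 1).foldl
            (aStep order (pre ++ x :: t)) ((bStep order (gapI pre, c) x).2)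
      _ = (PySem.List.pyRange (((pre ++ [x]).length : Int)) ((((pre ++ [x]) ++ t).length : Int)) 1).foldl
            (aStep order ((pre ++ [x]) ++ t)) ((bStep order (gapI pre, c) x).2) := by
            rw [hlen1, hassoc]
      _ = (t.foldl (bStep order) (gapI (pre ++ [x]), (bStep order (gapI pre, c) x).2)).2 :=
            ih (pre ++ [x]) ((bStep order (gapI pre, c) x).2)
      _ = (t.foldl (bStep order) (bStep order (gapI pre, c) x)).2 := by
            rw [hs.2]

theorem row_eq (order : Int) (row : List Int) (c : Int) :
    aRow order c row = (row.foldl (bStep order) ((0 : Int), c)).2 := by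
  have h := row_gen order row [] c
  simpa [aRow, gapI] using h

-- ===== VERDICT (by name: the statement is the Claim_ definition above) =====
theorem count_zeros_with_hat_spec : Claim_equal_count_zeros_with_hat := by
  intro arr order _
  unfold Spec_count_zeros_with_hat count_zeros_with_hat count_zeros_with_hat_alt
  rw [PySem.List.foldl_pyRange_zero_pyGetD']
  have hgen : ∀ (t : List (List Int)) (c : Int),
      t.foldl (fun sayı row => aRow order sayı row) c
      = t.foldl (fun total row => (row.foldl (bStep order) ((0 : Int), total)).2) c := by
    intro t
    induction t with
    | nil => intro c; rfl
    | cons r tt iht =>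
        intro c
        simp only [List.foldl_cons]
        rw [row_eq]
        exact iht _
  exact hgen arr 0
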